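-- pv_equiv track=rewrite | github.com/popoloni/astropy | astropy 2.py | find_label_position
-- ===== SOURCE A (Python) =====
-- def find_label_position(azimuths, altitudes, existing_positions, margin=3):
--     """Find suitable position for label that doesn't overlap with others"""
--     # Try middle position first
--     mid_idx = len(azimuths) // 2
--     mid_pos = (azimuths[mid_idx], altitudes[mid_idx])
--
--     if not any(abs(mid_pos[0] - pos[0]) < margin and abs(mid_pos[1] - pos[1]) < margin
--               for pos in existing_positions):
--         return mid_pos
--
--     # Try other positions along the trajectory
--     for i in range(len(azimuths)):
--         pos = (azimuths[i], altitudes[i])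
--         if not any(abs(pos[0] - existing_pos[0]) < margin and abs(pos[1] - existing_pos[1]) < margin
--                   for existing_pos in existing_positions):
--             return pos
--
--     return None
-- ===== SOURCE B (Python) =====
-- def find_label_position(azimuths, altitudes, existing_positions, margin=3):
--     """Find suitable position for label that doesn't overlap with others.
--     Same result as the nested-scan version, but by a different route:
--     existing positions are bucketed once into a grid of margin-sized cells,
--     and each candidate is checked against the 3x3 neighbouring cells only."""
--     mid_idx = len(azimuths) // 2
--     mid_pos = (azimuths[mid_idx], altitudes[mid_idx])
--     if margin <= 0:
--         # abs(...) < margin can never hold, so no position is ever blocked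
--         return mid_pos
--
--     grid = {}
--     for pos in existing_positions:
--         key = (pos[0] // margin, pos[1] // margin)
--         grid.setdefault(key, []).append((pos[0], pos[1]))
--
--     def blocked(x, y):
--         cx, cy = x // margin, y // margin
--         for dx in (-1, 0, 1):
--             for dy in (-1, 0, 1):
--                 for (px, py) in grid.get((cx + dx, cy + dy), ()):
--                     if abs(x - px) < margin and abs(y - py) < margin:
--                         return True
--         return False
--
--     if not blocked(*mid_pos):
--         return mid_pos
--     for i in range(len(azimuths)):
--         x, y = azimuths[i], altitudes[i]
--         if not blocked(x, y):
--             return (x, y)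
--     return None
-- ===== Notes on version B (the rewrite author's own statement) =====
-- stated objective: alternative
-- what changed: Existing positions are bucketed once into a hash grid of margin-sized cells; each candidate point is then checked only against the 3x3 neighbouring cells instead of scanning the whole existing_positions list for every trajectory point.
-- outside the precondition, e.g. on find_label_position([1], [1], [(100,)], 3): A returns (1, 1), B raises IndexError; on find_label_position([1, 2, 3], [9, 8], [], 3): A returns (2, 8), B returns (2, 8)
import Mathlib
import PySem

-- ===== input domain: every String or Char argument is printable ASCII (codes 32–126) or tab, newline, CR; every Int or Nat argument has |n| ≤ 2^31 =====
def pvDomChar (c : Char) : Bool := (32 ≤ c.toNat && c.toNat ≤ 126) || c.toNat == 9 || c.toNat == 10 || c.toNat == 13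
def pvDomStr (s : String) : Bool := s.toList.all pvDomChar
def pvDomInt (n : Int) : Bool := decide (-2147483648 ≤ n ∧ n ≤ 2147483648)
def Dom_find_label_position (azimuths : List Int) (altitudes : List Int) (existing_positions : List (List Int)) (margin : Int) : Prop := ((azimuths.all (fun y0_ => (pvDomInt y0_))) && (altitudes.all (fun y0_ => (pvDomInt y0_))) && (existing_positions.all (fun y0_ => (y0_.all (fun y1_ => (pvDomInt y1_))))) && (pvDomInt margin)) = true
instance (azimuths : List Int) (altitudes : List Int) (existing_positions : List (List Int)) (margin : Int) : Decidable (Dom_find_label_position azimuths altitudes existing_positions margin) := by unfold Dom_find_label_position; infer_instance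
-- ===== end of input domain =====

-- B replaces A's rescan of the whole existing_positions list per candidate by a grid of
-- margin-sized buckets built once, checking only the 3x3 neighbouring cells per candidate.

-- ===== PORT A =====
-- 'abs(q0 - pos[0]) < margin and abs(q1 - pos[1]) < margin', with Python's short-circuit:
-- pos[1] is read only when the first comparison holds; a failed index access (IndexError,
-- outside Pre_) is mapped to false / none.
def overlapA (x y m : Int) (pos : List Int) : Bool :=
  match PySem.List.pyGet? pos 0 with
  | none => false
  | some p0 =>
    if |x - p0| < m then
      match PySem.List.pyGet? pos 1 with
      | none => false
      | some p1 => decide (|y - p1| < m)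
    else false

-- the 'for i in range(len(azimuths))' loop of A
def loopA (az alt : List Int) (ex : List (List Int)) (m : Int) : List Int → Option (List Int)
  | [] => none
  | i :: rest =>
    match PySem.List.pyGet? az i, PySem.List.pyGet? alt i with
    | some x, some y =>
      if ex.any (overlapA x y m) then loopA az alt ex m rest else some [x, y]
    | _, _ => none  -- Python raises IndexError here (outside Pre_)

def find_label_position (azimuths : List Int) (altitudes : List Int) (existing_positions : List (List Int)) (margin : Int) : Option (List Int) :=
  let mid : Int := PySem.Int.floordiv (azimuths.length : Int) 2
  match PySem.List.pyGet? azimuths mid, PySem.List.pyGet? altitudes mid with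
  | some mx, some my =>
    if existing_positions.any (overlapA mx my margin) then
      loopA azimuths altitudes existing_positions margin
        (PySem.List.pyRange 0 (azimuths.length : Int) 1)
    else some [mx, my]
  | _, _ => none  -- Python raises IndexError here (outside Pre_)

-- ===== PORT B =====
-- 'grid.setdefault(key, []).append((pos[0], pos[1]))' is Dict.modify key [] (· ++ [p])
def buildGrid (m : Int) (ex : List (List Int)) : PySem.Dict (Int × Int) (List (Int × Int)) :=
  ex.foldl (fun g pos =>
    match PySem.List.pyGet? pos 0, PySem.List.pyGet? pos 1 with
    | some px, some py =>
      g.modify (PySem.Int.floordiv px m, PySem.Int.floordiv py m) [] (· ++ [(px, py)])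
    | _, _ => g)  -- Python raises IndexError here (outside Pre_)
    PySem.Dict.empty

-- the 'blocked' helper: scan the 3x3 neighbouring grid cells, early return True = any
def blockedB (g : PySem.Dict (Int × Int) (List (Int × Int))) (m x y : Int) : Bool :=
  [(-1 : Int), 0, 1].any fun dx =>
    [(-1 : Int), 0, 1].any fun dy =>
      (g.getD (PySem.Int.floordiv x m + dx, PySem.Int.floordiv y m + dy) []).any fun p =>
        decide (|x - p.1| < m) && decide (|y - p.2| < m)

-- the 'for i in range(len(azimuths))' loop of B
def loopB (az alt : List Int) (g : PySem.Dict (Int × Int) (List (Int × Int))) (m : Int) : List Int → Option (List Int)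
  | [] => none
  | i :: rest =>
    match PySem.List.pyGet? az i, PySem.List.pyGet? alt i with
    | some x, some y =>
      if blockedB g m x y then loopB az alt g m rest else some [x, y]
    | _, _ => none  -- Python raises IndexError here (outside Pre_)

def find_label_position_alt (azimuths : List Int) (altitudes : List Int) (existing_positions : List (List Int)) (margin : Int) : Option (List Int) :=
  let mid : Int := PySem.Int.floordiv (azimuths.length : Int) 2
  match PySem.List.pyGet? azimuths mid, PySem.List.pyGet? altitudes mid with
  | some mx, some my =>
    if margin ≤ 0 then some [mx, my]
    else
      let g := buildGrid margin existing_positions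
      if blockedB g margin mx my then
        loopB azimuths altitudes g margin (PySem.List.pyRange 0 (azimuths.length : Int) 1)
      else some [mx, my]
  | _, _ => none  -- Python raises IndexError here (outside Pre_)

-- ===== PRECONDITION & SPEC =====
-- Pre_ excludes: empty azimuths and altitudes shorter than azimuths (an index access of A
-- can raise IndexError there), and existing positions with fewer than 2 coordinates (A can
-- raise IndexError on pos[0]/pos[1], and where short-circuiting lets A return, B's grid
-- build reads pos[1] unconditionally and raises).
def Pre_find_label_position (azimuths : List Int) (altitudes : List Int) (existing_positions : List (List Int)) (margin : Int) : Prop :=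
  azimuths ≠ [] ∧ azimuths.length ≤ altitudes.length ∧ ∀ pos ∈ existing_positions, 2 ≤ pos.length
instance (azimuths : List Int) (altitudes : List Int) (existing_positions : List (List Int)) (margin : Int) : Decidable (Pre_find_label_position azimuths altitudes existing_positions margin) := by unfold Pre_find_label_position; infer_instance

def pvWitness_find_label_position : List Int × List Int × List (List Int) × Int :=
  ([0, 10, 20], [0, 10, 20], [[9, 9], [0, 1]], 3)

def Spec_find_label_position (azimuths : List Int) (altitudes : List Int) (existing_positions : List (List Int)) (margin : Int) (out : Option (List Int)) : Prop := out = find_label_position_alt azimuths altitudes existing_positions margin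
instance (azimuths : List Int) (altitudes : List Int) (existing_positions : List (List Int)) (margin : Int) (out : Option (List Int)) : Decidable (Spec_find_label_position azimuths altitudes existing_positions margin out) := by unfold Spec_find_label_position; infer_instance

-- ===== CLAIM (what is proved, stated in full; the proofs are below) =====
def Claim_equal_find_label_position : Prop := ∀ (azimuths : List Int) (altitudes : List Int) (existing_positions : List (List Int)) (margin : Int), Dom_find_label_position azimuths altitudes existing_positions margin → Pre_find_label_position azimuths altitudes existing_positions margin → Spec_find_label_position azimuths altitudes existing_positions margin (find_label_position azimuths altitudes existing_positions margin)

-- ===== LEMMAS AND PROOFS =====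

-- the (pos[0], pos[1]) pairs of the existing positions (total projection; under Pre_ it keeps every position)
def pairsOf (ex : List (List Int)) : List (Int × Int) :=
  ex.filterMap (fun pos =>
    match PySem.List.pyGet? pos 0, PySem.List.pyGet? pos 1 with
    | some a, some b => some (a, b)
    | _, _ => none)

theorem pairsOf_cons2 (a b : Int) (t : List Int) (ex : List (List Int)) :
    pairsOf ((a :: b :: t) :: ex) = (a, b) :: pairsOf ex := by
  simp [pairsOf, pysem]

theorem overlapA_cons2 (x y m a b : Int) (t : List Int) :
    overlapA x y m (a :: b :: t) = (decide (|x - a| < m) && decide (|y - b| < m)) := by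
  have h0 : PySem.List.pyGet? (a :: b :: t) (0 : Int) = some a := by simp [pysem]
  have h1 : PySem.List.pyGet? (a :: b :: t) (1 : Int) = some b := by simp [pysem]
  simp only [overlapA, h0, h1]
  by_cases h : |x - a| < m <;> simp [h]

theorem any_overlapA (ex : List (List Int)) (x y m : Int)
    (h : ∀ pos ∈ ex, 2 ≤ pos.length) :
    ex.any (overlapA x y m)
      = (pairsOf ex).any (fun p => decide (|x - p.1| < m) && decide (|y - p.2| < m)) := by
  induction ex with
  | nil => rfl
  | cons pos rest ih =>
    obtain ⟨a, b, t, rfl⟩ : ∃ a b t, pos = a :: b :: t := by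
      have h2 := h pos (by simp)
      match pos, h2 with
      | a :: b :: t, _ => exact ⟨a, b, t, rfl⟩
    rw [pairsOf_cons2]
    simp only [List.any_cons, overlapA_cons2,
      ih (fun p hp => h p (List.mem_cons_of_mem _ hp))]

-- a Dict.modify with default [] appending is the keyed grouping fold of PySem
theorem buildGrid_eq (m : Int) (ex : List (List Int)) :
    buildGrid m ex
      = ((pairsOf ex).map
          (fun q => ((PySem.Int.floordiv q.1 m, PySem.Int.floordiv q.2 m), q))).foldl
          (fun d p => d.modify p.1 [] (· ++ [p.2])) PySem.Dict.empty := by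
  unfold buildGrid
  generalize PySem.Dict.empty = g
  induction ex generalizing g with
  | nil => rfl
  | cons pos rest ih =>
    cases h0 : PySem.List.pyGet? pos 0 with
    | none => simp [pairsOf, h0, List.foldl_cons, ih]
    | some a =>
      cases h1 : PySem.List.pyGet? pos 1 with
      | none => simp [pairsOf, h0, h1, List.foldl_cons, ih]
      | some b => simp [pairsOf, h0, h1, List.foldl_cons, ih]

theorem getD_buildGrid (m : Int) (ex : List (List Int)) (c : Int × Int) :
    (buildGrid m ex).getD c []
      = (pairsOf ex).filter
          (fun q => ((PySem.Int.floordiv q.1 m, PySem.Int.floordiv q.2 m) : Int × Int) == c) := by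
  rw [buildGrid_eq, PySem.Dict.getD_foldl_modify_append]
  simp [List.filter_map, List.map_map, Function.comp_def]

-- a conflicting point lies in one of the 3 cell columns / rows around the candidate
theorem cell_range (m x a : Int) (hm : 0 < m) (h : |x - a| < m) :
    PySem.Int.floordiv a m = PySem.Int.floordiv x m - 1 ∨
    PySem.Int.floordiv a m = PySem.Int.floordiv x m ∨
    PySem.Int.floordiv a m = PySem.Int.floordiv x m + 1 := by
  rw [abs_lt] at h
  have hq := PySem.Int.floordiv_mul_add_mod x m
  have h1 := PySem.Int.mod_nonneg x (b := m) hm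
  have h2 := PySem.Int.mod_lt x (b := m) hm
  set q := PySem.Int.floordiv x m with hqdef
  by_cases ha : a < q * m
  · left
    rw [PySem.Int.floordiv_eq_iff_of_pos hm]
    constructor <;> nlinarith
  · by_cases hb : a < (q + 1) * m
    · right; left
      rw [PySem.Int.floordiv_eq_iff_of_pos hm]
      constructor <;> nlinarith
    · right; right
      rw [PySem.Int.floordiv_eq_iff_of_pos hm]
      constructor <;> nlinarith

theorem blockedB_eq (ex : List (List Int)) (m x y : Int) (hm : 0 < m) :
    blockedB (buildGrid m ex) m x y
      = (pairsOf ex).any (fun p => decide (|x - p.1| < m) && decide (|y - p.2| < m)) := by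
  rw [Bool.eq_iff_iff]
  simp only [blockedB, List.any_eq_true, getD_buildGrid, List.mem_filter, beq_iff_eq,
    Bool.and_eq_true, decide_eq_true_eq, List.mem_cons, List.not_mem_nil, or_false]
  constructor
  · rintro ⟨dx, _, dy, _, p, ⟨hp, _⟩, hcx, hcy⟩
    exact ⟨p, hp, hcx, hcy⟩
  · rintro ⟨p, hp, hcx, hcy⟩
    rcases cell_range m x p.1 hm hcx with hx1 | hx1 | hx1 <;>
      rcases cell_range m y p.2 hm hcy with hy1 | hy1 | hy1 <;>
      exact ⟨PySem.Int.floordiv p.1 m - PySem.Int.floordiv x m, by omega,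
        PySem.Int.floordiv p.2 m - PySem.Int.floordiv y m, by omega,
        p, ⟨hp, by rw [Prod.mk.injEq]; omega⟩, hcx, hcy⟩

theorem loopA_eq_loopB (az alt : List Int) (ex : List (List Int)) (m : Int)
    (hm : 0 < m) (h : ∀ pos ∈ ex, 2 ≤ pos.length) (idxs : List Int) :
    loopA az alt ex m idxs = loopB az alt (buildGrid m ex) m idxs := by
  induction idxs with
  | nil => rfl
  | cons i rest ih =>
    simp only [loopA, loopB]
    cases PySem.List.pyGet? az i with
    | none => cases PySem.List.pyGet? alt i <;> rfl
    | some x =>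
      cases PySem.List.pyGet? alt i with
      | none => rfl
      | some y =>
        dsimp only
        rw [any_overlapA _ _ _ _ h, ← blockedB_eq _ _ _ _ hm, ih]

theorem any_overlapA_nonpos (ex : List (List Int)) (x y m : Int) (hm : m ≤ 0) :
    ex.any (overlapA x y m) = false := by
  simp only [List.any_eq_false]
  intro pos _
  cases h0 : PySem.List.pyGet? pos 0 with
  | none => simp [overlapA, h0]
  | some p0 =>
    have hlt : ¬ |x - p0| < m := by have := abs_nonneg (x - p0); omega
    simp [overlapA, h0, hlt]

-- ===== VERDICT (by name: the statement is the Claim_ definition above) =====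
theorem find_label_position_spec : Claim_equal_find_label_position := by
  intro az alt ex m _ hpre
  obtain ⟨_, _, hexl⟩ := hpre
  unfold Spec_find_label_position find_label_position find_label_position_alt
  dsimp only
  cases h1 : PySem.List.pyGet? az (PySem.Int.floordiv (az.length : Int) 2) with
  | none => cases PySem.List.pyGet? alt (PySem.Int.floordiv (az.length : Int) 2) <;> rfl
  | some mx =>
    cases h2 : PySem.List.pyGet? alt (PySem.Int.floordiv (az.length : Int) 2) with
    | none => rfl
    | some my =>
      dsimp only
      by_cases hm : m ≤ 0
      · rw [any_overlapA_nonpos _ _ _ _ hm]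
        simp [hm]
      · have hm' : 0 < m := by omega
        rw [any_overlapA _ _ _ _ hexl, ← blockedB_eq _ _ _ _ hm',
          loopA_eq_loopB _ _ _ _ hm' hexl]
        simp [hm]
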